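-- pv_equiv track=rewrite | github.com/eldon31/rag_clean | processor/kaggle_ultimate_embedder_v4.py | _normalize_collection_name
-- ===== SOURCE A (Python) =====
-- def _normalize_collection_name(raw_name: str) -> str:
--     """Map raw collection folder names to canonical Qdrant collections."""
--
--     if not raw_name:
--         return "qdrant_ecosystem"
--
--     normalized = raw_name.strip().lower().replace('-', '_').replace(' ', '_')
--
--     explicit_map = {
--         "qdrant_v4_outputs": "qdrant_ecosystem",
--         "qdrant_ecosystem_v4_outputs": "qdrant_ecosystem",
--         "qdrant_ecosystem": "qdrant_ecosystem",
--         "sentence_transformers_v4_outputs": "sentence_transformers",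
--         "sentence_transformers": "sentence_transformers",
--         "docling_v4_outputs": "docling",
--         "docling": "docling",
--         "fast_docs_v4_outputs": "fast_docs",
--         "fast_docs": "fast_docs",
--         "pydantic_pydantic_v4_outputs": "pydantic",
--         "pydantic_v4_outputs": "pydantic",
--         "pydantic": "pydantic",
--     }
--
--     if normalized in explicit_map:
--         return explicit_map[normalized]
--
--     keyword_map = {
--         "qdrant": "qdrant_ecosystem",
--         "sentence_transformer": "sentence_transformers",
--         "sentence": "sentence_transformers",
--         "docling": "docling",
--         "fast_docs": "fast_docs",
--         "pydantic": "pydantic",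
--     }
--
--     for keyword, target in keyword_map.items():
--         if keyword in normalized:
--             return target
--
--     return normalized
-- ===== SOURCE B (Python) =====
-- _KEYWORDS = (
--     ("qdrant", "qdrant_ecosystem"),
--     ("sentence_transformer", "sentence_transformers"),
--     ("sentence", "sentence_transformers"),
--     ("docling", "docling"),
--     ("fast_docs", "fast_docs"),
--     ("pydantic", "pydantic"),
-- )
--
--
-- def _normalize_collection_name(raw_name: str) -> str:
--     """Map raw collection folder names to canonical Qdrant collections.
--
--     Single pass: the explicit-map phase of the original is redundant, since
--     every exact key contains its keyword and the keyword order resolves it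
--     to the same canonical name.
--     """
--     if not raw_name:
--         return "qdrant_ecosystem"
--     normalized = raw_name.strip().lower().replace('-', '_').replace(' ', '_')
--     return next((target for kw, target in _KEYWORDS if kw in normalized), normalized)
-- ===== Notes on version B (the rewrite author's own statement) =====
-- stated objective: simpler
-- what changed: B deletes A's 12-entry explicit exact-match dictionary and its lookup branch entirely and runs only the single ordered keyword-substring pass (as a first-match search over a pair list), which provably yields the same canonical name on every input.
import Mathlib
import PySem

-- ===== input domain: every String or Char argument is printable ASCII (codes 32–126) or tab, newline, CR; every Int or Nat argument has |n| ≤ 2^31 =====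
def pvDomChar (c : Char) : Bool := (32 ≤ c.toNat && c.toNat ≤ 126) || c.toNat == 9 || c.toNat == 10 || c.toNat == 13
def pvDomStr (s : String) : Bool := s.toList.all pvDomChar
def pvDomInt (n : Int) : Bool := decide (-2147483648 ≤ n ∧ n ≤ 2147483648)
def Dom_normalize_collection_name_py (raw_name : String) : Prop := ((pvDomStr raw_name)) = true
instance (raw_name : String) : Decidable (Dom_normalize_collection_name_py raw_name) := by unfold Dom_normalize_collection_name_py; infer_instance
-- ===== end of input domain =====

-- B drops A's redundant explicit exact-match table: every exact key contains its keyword with the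
-- same canonical target, so the single ordered keyword-substring pass alone gives the same result (simpler).

-- ===== PORT A =====
-- A's `for keyword, target in keyword_map.items(): if keyword in normalized: return target`
def pvALoop (items : List (String × String)) (normalized : String) : String :=
  match items with
  | [] => normalized
  | (keyword, target) :: rest =>
    if PySem.Str.isIn keyword normalized then target else pvALoop rest normalized

def pvExplicitMap : PySem.Dict String String := PySem.Dict.ofList
  [ ("qdrant_v4_outputs", "qdrant_ecosystem"),
    ("qdrant_ecosystem_v4_outputs", "qdrant_ecosystem"),
    ("qdrant_ecosystem", "qdrant_ecosystem"),
    ("sentence_transformers_v4_outputs", "sentence_transformers"),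
    ("sentence_transformers", "sentence_transformers"),
    ("docling_v4_outputs", "docling"),
    ("docling", "docling"),
    ("fast_docs_v4_outputs", "fast_docs"),
    ("fast_docs", "fast_docs"),
    ("pydantic_pydantic_v4_outputs", "pydantic"),
    ("pydantic_v4_outputs", "pydantic"),
    ("pydantic", "pydantic") ]

def pvKeywordMap : PySem.Dict String String := PySem.Dict.ofList
  [ ("qdrant", "qdrant_ecosystem"),
    ("sentence_transformer", "sentence_transformers"),
    ("sentence", "sentence_transformers"),
    ("docling", "docling"),
    ("fast_docs", "fast_docs"),
    ("pydantic", "pydantic") ]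

def normalize_collection_name_py (raw_name : String) : String :=
  if raw_name = "" then "qdrant_ecosystem"
  else
    let normalized :=
      PySem.Str.replace (PySem.Str.replace (PySem.Str.lower (PySem.Str.strip raw_name)) "-" "_") " " "_"
    match pvExplicitMap.get? normalized with
    | some v => v
    | none => pvALoop pvKeywordMap.items normalized

-- ===== PORT B =====
def pvKeywords : List (String × String) :=
  [ ("qdrant", "qdrant_ecosystem"),
    ("sentence_transformer", "sentence_transformers"),
    ("sentence", "sentence_transformers"),
    ("docling", "docling"),
    ("fast_docs", "fast_docs"),
    ("pydantic", "pydantic") ]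

def normalize_collection_name_py_alt (raw_name : String) : String :=
  if raw_name = "" then "qdrant_ecosystem"
  else
    let normalized :=
      PySem.Str.replace (PySem.Str.replace (PySem.Str.lower (PySem.Str.strip raw_name)) "-" "_") " " "_"
    ((pvKeywords.find? (fun p => PySem.Str.isIn p.1 normalized)).map (·.2)).getD normalized

-- ===== PRECONDITION & SPEC =====
def Spec_normalize_collection_name_py (raw_name : String) (out : String) : Prop := out = normalize_collection_name_py_alt raw_name
instance (raw_name : String) (out : String) : Decidable (Spec_normalize_collection_name_py raw_name out) := by unfold Spec_normalize_collection_name_py; infer_instance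

-- ===== CLAIM (what is proved, stated in full; the proofs are below) =====
def Claim_equal_normalize_collection_name_py : Prop := ∀ (raw_name : String), Dom_normalize_collection_name_py raw_name → Spec_normalize_collection_name_py raw_name (normalize_collection_name_py raw_name)

-- ===== LEMMAS AND PROOFS =====

-- A's early-return scan over a pair list equals B's find?-then-project formulation.
theorem pvALoop_eq_find (items : List (String × String)) (n : String) :
    pvALoop items n = ((items.find? (fun p => PySem.Str.isIn p.1 n)).map (·.2)).getD n := by
  induction items with
  | nil => simp [pvALoop]
  | cons p rest ih =>
    obtain ⟨k, t⟩ := p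
    by_cases h : PySem.Chars.isIn k.toList n.toList = true
    · simp [pvALoop, List.find?, h]
    · simp only [Bool.not_eq_true] at h
      simp [pvALoop, List.find?, h, ih]

-- If the explicit map hits, the keyword scan would have produced the same value.
theorem pvExplicit_agrees (n v : String) (h : pvExplicitMap.get? n = some v) :
    pvALoop pvKeywordMap.items n = v := by
  by_cases h1 : n = "qdrant_v4_outputs"
  · subst h1
    rw [(by decide : pvExplicitMap.get? "qdrant_v4_outputs" = some "qdrant_ecosystem")] at h
    obtain rfl := (Option.some.inj h).symm
    decide
  by_cases h2 : n = "qdrant_ecosystem_v4_outputs"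
  · subst h2
    rw [(by decide : pvExplicitMap.get? "qdrant_ecosystem_v4_outputs" = some "qdrant_ecosystem")] at h
    obtain rfl := (Option.some.inj h).symm
    decide
  by_cases h3 : n = "qdrant_ecosystem"
  · subst h3
    rw [(by decide : pvExplicitMap.get? "qdrant_ecosystem" = some "qdrant_ecosystem")] at h
    obtain rfl := (Option.some.inj h).symm
    decide
  by_cases h4 : n = "sentence_transformers_v4_outputs"
  · subst h4
    rw [(by decide : pvExplicitMap.get? "sentence_transformers_v4_outputs" = some "sentence_transformers")] at h
    obtain rfl := (Option.some.inj h).symm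
    decide
  by_cases h5 : n = "sentence_transformers"
  · subst h5
    rw [(by decide : pvExplicitMap.get? "sentence_transformers" = some "sentence_transformers")] at h
    obtain rfl := (Option.some.inj h).symm
    decide
  by_cases h6 : n = "docling_v4_outputs"
  · subst h6
    rw [(by decide : pvExplicitMap.get? "docling_v4_outputs" = some "docling")] at h
    obtain rfl := (Option.some.inj h).symm
    decide
  by_cases h7 : n = "docling"
  · subst h7
    rw [(by decide : pvExplicitMap.get? "docling" = some "docling")] at h
    obtain rfl := (Option.some.inj h).symm
    decide
  by_cases h8 : n = "fast_docs_v4_outputs"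
  · subst h8
    rw [(by decide : pvExplicitMap.get? "fast_docs_v4_outputs" = some "fast_docs")] at h
    obtain rfl := (Option.some.inj h).symm
    decide
  by_cases h9 : n = "fast_docs"
  · subst h9
    rw [(by decide : pvExplicitMap.get? "fast_docs" = some "fast_docs")] at h
    obtain rfl := (Option.some.inj h).symm
    decide
  by_cases h10 : n = "pydantic_pydantic_v4_outputs"
  · subst h10
    rw [(by decide : pvExplicitMap.get? "pydantic_pydantic_v4_outputs" = some "pydantic")] at h
    obtain rfl := (Option.some.inj h).symm
    decide
  by_cases h11 : n = "pydantic_v4_outputs"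
  · subst h11
    rw [(by decide : pvExplicitMap.get? "pydantic_v4_outputs" = some "pydantic")] at h
    obtain rfl := (Option.some.inj h).symm
    decide
  by_cases h12 : n = "pydantic"
  · subst h12
    rw [(by decide : pvExplicitMap.get? "pydantic" = some "pydantic")] at h
    obtain rfl := (Option.some.inj h).symm
    decide
  rw [(by decide : pvExplicitMap = PySem.Dict.mk
    [ ("qdrant_v4_outputs", "qdrant_ecosystem"),
      ("qdrant_ecosystem_v4_outputs", "qdrant_ecosystem"),
      ("qdrant_ecosystem", "qdrant_ecosystem"),
      ("sentence_transformers_v4_outputs", "sentence_transformers"),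
      ("sentence_transformers", "sentence_transformers"),
      ("docling_v4_outputs", "docling"),
      ("docling", "docling"),
      ("fast_docs_v4_outputs", "fast_docs"),
      ("fast_docs", "fast_docs"),
      ("pydantic_pydantic_v4_outputs", "pydantic"),
      ("pydantic_v4_outputs", "pydantic"),
      ("pydantic", "pydantic") ])] at h
  simp [PySem.Dict.get?,
    Ne.symm h1, Ne.symm h2, Ne.symm h3, Ne.symm h4, Ne.symm h5, Ne.symm h6,
    Ne.symm h7, Ne.symm h8, Ne.symm h9, Ne.symm h10, Ne.symm h11, Ne.symm h12] at h

theorem pvKeywordItems : pvKeywordMap.items = pvKeywords := by decide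

-- ===== VERDICT (by name: the statement is the Claim_ definition above) =====
theorem normalize_collection_name_py_spec : Claim_equal_normalize_collection_name_py := by
  intro raw_name _
  unfold Spec_normalize_collection_name_py normalize_collection_name_py normalize_collection_name_py_alt
  by_cases he : raw_name = ""
  · simp [he]
  · simp only [he, if_false]
    set n := PySem.Str.replace (PySem.Str.replace (PySem.Str.lower (PySem.Str.strip raw_name)) "-" "_") " " "_" with hn
    rcases hg : pvExplicitMap.get? n with _ | v
    · rw [← pvALoop_eq_find, pvKeywordItems]
    · rw [← pvALoop_eq_find, ← pvKeywordItems, pvExplicit_agrees n v hg]
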